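-- pv_equiv track=rewrite | github.com/johnding1996/Slurm-vLLM | api.py | create_short_model_name
-- ===== SOURCE A (Python) =====
-- def create_short_model_name(model_name):
--     """Create a shortened version of the model name for display purposes."""
--     if not model_name:
--         return "Unknown"
--
--     # Split by '/'
--     parts = model_name.split("/")
--
--     shortened_parts = []
--     for part in parts:
--         # Split by '-'
--         segments = part.split("-")
--
--         # Shorten each segment
--         shortened_segments = []
--         for segment in segments:
--             # Take first 4 chars or all if len <= 4
--             shortened_segments.append(segment[:4] if len(segment) > 4 else segment)
--
--         # Join segments back with '-'
--         shortened_parts.append("-".join(shortened_segments))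
--
--     # Join parts back with '/'
--     return "/".join(shortened_parts)
-- ===== SOURCE B (Python) =====
-- def create_short_model_name(model_name):
--     """Create a shortened version of the model name for display purposes."""
--     if not model_name:
--         return "Unknown"
--     # Single character-level pass: copy separators, and copy at most the
--     # first 4 characters of each maximal run of non-separator characters.
--     out = []
--     run = 0
--     for ch in model_name:
--         if ch == "/" or ch == "-":
--             out.append(ch)
--             run = 0
--         else:
--             if run < 4:
--                 out.append(ch)
--             run += 1
--     return "".join(out)
-- ===== Notes on version B (the rewrite author's own statement) =====
-- stated objective: simpler
-- what changed: Replaces the two-level split-on-slash/split-on-dash/truncate/join pipeline with a single left-to-right character scan that keeps a run-length counter, copying separator characters verbatim and at most the first 4 characters of each maximal run of non-separator characters.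
import Mathlib
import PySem

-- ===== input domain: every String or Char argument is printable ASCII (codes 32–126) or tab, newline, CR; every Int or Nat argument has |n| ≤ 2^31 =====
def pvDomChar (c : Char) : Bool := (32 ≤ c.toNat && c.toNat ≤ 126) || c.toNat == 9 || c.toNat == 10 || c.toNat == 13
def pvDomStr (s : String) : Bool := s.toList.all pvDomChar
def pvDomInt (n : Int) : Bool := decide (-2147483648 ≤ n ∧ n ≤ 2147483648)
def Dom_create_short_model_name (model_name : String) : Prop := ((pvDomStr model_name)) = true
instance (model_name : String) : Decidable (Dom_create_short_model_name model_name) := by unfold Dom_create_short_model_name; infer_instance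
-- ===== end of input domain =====

-- B replaces A's two-level split/truncate/join pipeline by a single character scan
-- with a run-length counter (objective: simpler; same asymptotic cost).

-- ===== PORT A =====
def create_short_model_name (model_name : String) : String :=
  if model_name.toList = [] then "Unknown"
  else
    let parts := PySem.Chars.splitOn model_name.toList ['/']
    let shortened_parts := parts.foldl (fun acc part =>
      let segments := PySem.Chars.splitOn part ['-']
      let shortened_segments := segments.foldl (fun acc2 segment =>
        acc2 ++ [if PySem.Chars.len segment > 4
                 then PySem.List.slice segment none (some 4) else segment]) []
      acc ++ [PySem.Chars.join ['-'] shortened_segments]) []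
    String.ofList (PySem.Chars.join ['/'] shortened_parts)

-- ===== PORT B =====
def create_short_model_name_alt (model_name : String) : String :=
  if model_name.toList = [] then "Unknown"
  else
    let st := model_name.toList.foldl (fun (st : List Char × Nat) ch =>
      if ch = '/' ∨ ch = '-' then (st.1 ++ [ch], 0)
      else ((if st.2 < 4 then st.1 ++ [ch] else st.1), st.2 + 1)) ([], 0)
    String.ofList st.1

-- ===== PRECONDITION & SPEC =====
def Spec_create_short_model_name (model_name : String) (out : String) : Prop := out = create_short_model_name_alt model_name
instance (model_name : String) (out : String) : Decidable (Spec_create_short_model_name model_name out) := by unfold Spec_create_short_model_name; infer_instance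

-- ===== CLAIM (what is proved, stated in full; the proofs are below) =====
def Claim_equal_create_short_model_name : Prop := ∀ (model_name : String), Dom_create_short_model_name model_name → Spec_create_short_model_name model_name (create_short_model_name model_name)

-- ===== LEMMAS AND PROOFS =====
def pvSp (c : Char) : List Char → List (List Char)
  | [] => [[]]
  | x :: xs => if x = c then [] :: pvSp c xs else (pvSp c xs).modifyHead (x :: ·)

theorem pvSp_ne_nil (c : Char) (cs : List Char) : pvSp c cs ≠ [] := by
  cases cs with
  | nil => simp [pvSp]
  | cons x xs =>
    simp only [pvSp]
    split
    · simp
    · cases h : pvSp c xs with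
      | nil => exact absurd h (pvSp_ne_nil c xs)
      | cons a t => simp

theorem pvSp_cons' (c : Char) (cs : List Char) : ∃ a t, pvSp c cs = a :: t := by
  cases h : pvSp c cs with
  | nil => exact absurd h (pvSp_ne_nil c cs)
  | cons a t => exact ⟨a, t, rfl⟩

theorem pvSp_go (c : Char) (fuel : Nat) :
    ∀ (l cur : List Char) (accs : List (List Char)), l.length ≤ fuel →
      PySem.Chars.splitOn.go [c] fuel l cur accs =
        accs.reverse ++ (pvSp c l).modifyHead (cur.reverse ++ ·) := by
  induction fuel with
  | zero =>
    intro l cur accs hl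
    have : l = [] := by cases l <;> simp_all
    subst this
    simp [PySem.Chars.splitOn.go, pvSp]
  | succ fuel ih =>
    intro l cur accs hl
    cases l with
    | nil => simp [PySem.Chars.splitOn.go, pvSp]
    | cons x xs =>
      rw [PySem.Chars.splitOn.go]
      have hpre : List.isPrefixOf [c] (x :: xs) = (c == x) := by
        simp [List.isPrefixOf]
      by_cases hx : x = c
      · rw [if_pos (by simp [hx])]
        simp only [List.length_cons, List.drop_succ_cons, List.length_nil, List.drop_zero]
        rw [ih _ _ _ (by simp at hl; omega)]
        obtain ⟨a, t, h⟩ := pvSp_cons' c xs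
        simp [pvSp, h, hx]
      · rw [if_neg (by simp [hpre]; intro h; exact hx h.symm)]
        rw [ih _ _ _ (by simp at hl ⊢; omega)]
        obtain ⟨a, t, h⟩ := pvSp_cons' c xs
        simp [pvSp, h, hx]

theorem pvSplitOn_eq_sp (c : Char) (cs : List Char) :
    PySem.Chars.splitOn cs [c] = pvSp c cs := by
  rw [PySem.Chars.splitOn, pvSp_go c _ _ _ _ (by omega)]
  obtain ⟨a, t, h⟩ := pvSp_cons' c cs
  simp [h]

theorem pvSp_mem (c : Char) (cs : List Char) (p : List Char) (hp : p ∈ pvSp c cs) : c ∉ p := by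
  induction cs generalizing p with
  | nil => simp [pvSp] at hp; simp [hp]
  | cons x xs ih =>
    simp only [pvSp] at hp
    by_cases hx : x = c
    · rw [if_pos hx] at hp
      rcases List.mem_cons.mp hp with h | h
      · simp [h]
      · exact ih p h
    · rw [if_neg hx] at hp
      obtain ⟨a, t, h⟩ := pvSp_cons' c xs
      rw [h] at hp
      simp only [List.modifyHead] at hp
      rcases List.mem_cons.mp hp with h2 | h2
      · subst h2
        have : c ∉ a := ih a (by simp [h])
        simp [List.mem_cons, this]; exact fun hh => hx hh.symm
      · exact ih p (by simp [h, h2])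

def pvG : Nat → List Char → List Char
  | _, [] => []
  | r, x :: xs =>
    if x = '/' ∨ x = '-' then x :: pvG 0 xs
    else (if r < 4 then [x] else []) ++ pvG (r + 1) xs

def pvJm : Nat → List (List Char) → List Char
  | _, [] => []
  | r, [seg] => seg.take (4 - r)
  | r, seg :: rest => seg.take (4 - r) ++ '-' :: pvJm 0 rest

def pvGp : Nat → List (List Char) → List Char
  | _, [] => []
  | r, [p] => pvG r p
  | r, p :: rest => pvG r p ++ '/' :: pvGp 0 rest

theorem pvTake_cons (r : Nat) (x : Char) (h : List Char) :
    (x :: h).take (4 - r) = (if r < 4 then [x] else []) ++ h.take (4 - (r + 1)) := by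
  by_cases hr : r < 4
  · have : 4 - r = (4 - (r + 1)) + 1 := by omega
    simp [this, hr]
  · have h1 : 4 - r = 0 := by omega
    have h2 : 4 - (r + 1) = 0 := by omega
    simp [h1, h2, hr]

theorem pvJm_cons (r : Nat) (x : Char) (h : List Char) (t : List (List Char)) :
    pvJm r ((x :: h) :: t) = (if r < 4 then [x] else []) ++ pvJm (r + 1) (h :: t) := by
  cases t with
  | nil => simp [pvJm, pvTake_cons]
  | cons b t' => simp [pvJm, pvTake_cons]

theorem pvL1 (cs : List Char) : ∀ (r : Nat), '/' ∉ cs →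
    pvG r cs = pvJm r (pvSp '-' cs) := by
  induction cs with
  | nil => intro r _; simp [pvG, pvSp, pvJm]
  | cons x xs ih =>
    intro r hmem
    have hx : x ≠ '/' := by simp at hmem; exact fun hh => hmem.1 hh.symm
    have hxs : '/' ∉ xs := by simp at hmem; exact hmem.2
    by_cases hd : x = '-'
    · obtain ⟨a, t, h⟩ := pvSp_cons' '-' xs
      simp only [pvG, pvSp, if_pos hd, if_pos (Or.inr hd), h, pvJm]
      simp [hd, ih 0 hxs, h]
    · obtain ⟨a, t, h⟩ := pvSp_cons' '-' xs
      have hcond : ¬ (x = '/' ∨ x = '-') := by simp [hx, hd]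
      simp only [pvG, pvSp, if_neg hd, if_neg hcond, h, List.modifyHead, pvJm_cons]
      rw [ih (r + 1) hxs, h]

theorem pvGp_cons_sep (h : List Char) (t : List (List Char)) (r : Nat) :
    pvGp r (('-' :: h) :: t) = '-' :: pvGp 0 (h :: t) := by
  cases t with
  | nil => simp [pvGp, pvG]
  | cons b t' => simp [pvGp, pvG]

theorem pvGp_cons_plain (x : Char) (h : List Char) (t : List (List Char)) (r : Nat)
    (hx : ¬ (x = '/' ∨ x = '-')) :
    pvGp r ((x :: h) :: t) = (if r < 4 then [x] else []) ++ pvGp (r + 1) (h :: t) := by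
  cases t with
  | nil => simp [pvGp, pvG, hx]
  | cons b t' => simp [pvGp, pvG, hx]

theorem pvL2 (cs : List Char) : ∀ (r : Nat), pvG r cs = pvGp r (pvSp '/' cs) := by
  induction cs with
  | nil => intro r; simp [pvG, pvSp, pvGp]
  | cons x xs ih =>
    intro r
    by_cases hs : x = '/'
    · obtain ⟨a, t, h⟩ := pvSp_cons' '/' xs
      simp only [pvSp, if_pos hs, h, pvGp, pvG, if_pos (Or.inl hs)]
      simp [hs, ih 0, h]
    · obtain ⟨a, t, h⟩ := pvSp_cons' '/' xs
      simp only [pvSp, if_neg hs, h, List.modifyHead]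
      by_cases hd : x = '-'
      · rw [hd, pvGp_cons_sep]
        simp [pvG, ih 0, h]
      · have hcond : ¬ (x = '/' ∨ x = '-') := by simp [hs, hd]
        rw [pvGp_cons_plain _ _ _ _ hcond]
        simp only [pvG, if_neg hcond]
        rw [ih (r + 1), h]

theorem pvJoin_take (parts : List (List Char)) :
    PySem.Chars.join ['-'] (parts.map (List.take 4)) = pvJm 0 parts := by
  induction parts with
  | nil => simp [PySem.Chars.join_nil, pvJm]
  | cons p rest ih =>
    cases rest with
    | nil => simp [PySem.Chars.join_singleton, pvJm]
    | cons q t =>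
      simp only [List.map_cons] at ih ⊢
      rw [PySem.Chars.join_cons_cons, ih]
      simp [pvJm]

theorem pvJoin_g (parts : List (List Char)) :
    PySem.Chars.join ['/'] (parts.map (pvG 0)) = pvGp 0 parts := by
  induction parts with
  | nil => simp [PySem.Chars.join_nil, pvGp]
  | cons p rest ih =>
    cases rest with
    | nil => simp [PySem.Chars.join_singleton, pvGp]
    | cons q t =>
      simp only [List.map_cons] at ih ⊢
      rw [PySem.Chars.join_cons_cons, ih]
      simp [pvGp]

theorem pvTrunc (segment : List Char) :
    (if PySem.Chars.len segment > 4
     then PySem.List.slice segment none (some 4) else segment) = segment.take 4 := by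
  rw [PySem.List.slice_to segment (by omega : (0:Int) ≤ 4)]
  by_cases h : PySem.Chars.len segment > 4
  · rw [if_pos h]; rfl
  · rw [if_neg h]
    have : segment.length ≤ 4 := by
      simp [PySem.Chars.len_eq] at h; exact_mod_cast h
    simp [List.take_of_length_le this]

theorem pvA_eq (cs : List Char) (h : cs ≠ []) :
    create_short_model_name (String.ofList cs) = String.ofList (pvG 0 cs) := by
  rw [create_short_model_name, String.toList_ofList, if_neg h]
  simp only [pvTrunc, PySem.List.foldl_append_singleton_eq_map, List.nil_append,
    pvSplitOn_eq_sp, pvJoin_take]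
  have hmap : (pvSp '/' cs).map (fun part => pvJm 0 (pvSp '-' part))
      = (pvSp '/' cs).map (pvG 0) := by
    apply List.map_congr_left
    intro p hp
    exact (pvL1 p 0 (pvSp_mem '/' cs p hp)).symm
  rw [hmap, pvJoin_g, ← pvL2]

theorem pvB_inv (cs : List Char) : ∀ (out : List Char) (r : Nat),
    (cs.foldl (fun (st : List Char × Nat) ch =>
      if ch = '/' ∨ ch = '-' then (st.1 ++ [ch], 0)
      else ((if st.2 < 4 then st.1 ++ [ch] else st.1), st.2 + 1)) (out, r)).1
    = out ++ pvG r cs := by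
  induction cs with
  | nil => intro out r; simp [pvG]
  | cons x xs ih =>
    intro out r
    by_cases hx : x = '/' ∨ x = '-'
    · simp only [List.foldl_cons, if_pos hx, ih, pvG]
      simp
    · simp only [List.foldl_cons, if_neg hx, ih, pvG]
      by_cases hr : r < 4 <;> simp [hr]

theorem pvB_eq (cs : List Char) (h : cs ≠ []) :
    create_short_model_name_alt (String.ofList cs) = String.ofList (pvG 0 cs) := by
  rw [create_short_model_name_alt, String.toList_ofList, if_neg h]
  simp [pvB_inv cs [] 0]

-- ===== VERDICT (by name: the statement is the Claim_ definition above) =====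
theorem create_short_model_name_spec : Claim_equal_create_short_model_name := by
  intro s _
  unfold Spec_create_short_model_name
  by_cases h : s.toList = []
  · simp [create_short_model_name, create_short_model_name_alt, h]
  · have hs : s = String.ofList s.toList := by simp
    rw [hs, pvA_eq _ h, pvB_eq _ h]
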